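-- pv_equiv track=rewrite | github.com/heasun0111/Algorithm | python/line_4.py | solution
-- ===== SOURCE A (Python) =====
-- def solution(arr, brr):
--     diff=[]
--     for i in range(len(arr)):
--         diff.append(arr[i]-brr[i])
--
--     answer=0
--     for j in range(len(diff)-1):
--         if diff[j]!=0:
--             diff[j + 1] = diff[j + 1] + diff[j]
--             answer=answer+1
--
--     return answer
-- ===== SOURCE B (Python) =====
-- def solution(arr, brr):
--     # Count the proper prefixes (lengths 1 .. len(arr)-1) on which the two
--     # arrays have different sums; each prefix sum is recomputed from scratch.
--     n = len(arr)
--     answer = 0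
--     for j in range(1, n):
--         if sum(arr[:j]) != sum(brr[:j]):
--             answer += 1
--     return answer
-- ===== Notes on version B (the rewrite author's own statement) =====
-- stated objective: alternative
-- what changed: A builds an explicit diff list and does one mutating pass over it (conditionally folding diff[j] into diff[j+1]) counting the mutations; B builds no diff list and mutates nothing: it directly counts the proper prefixes on which the two arrays have different sums, recomputing each prefix sum from scratch with sum(arr[:j]) != sum(brr[:j]) (brute force, quadratic).
import Mathlib
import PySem

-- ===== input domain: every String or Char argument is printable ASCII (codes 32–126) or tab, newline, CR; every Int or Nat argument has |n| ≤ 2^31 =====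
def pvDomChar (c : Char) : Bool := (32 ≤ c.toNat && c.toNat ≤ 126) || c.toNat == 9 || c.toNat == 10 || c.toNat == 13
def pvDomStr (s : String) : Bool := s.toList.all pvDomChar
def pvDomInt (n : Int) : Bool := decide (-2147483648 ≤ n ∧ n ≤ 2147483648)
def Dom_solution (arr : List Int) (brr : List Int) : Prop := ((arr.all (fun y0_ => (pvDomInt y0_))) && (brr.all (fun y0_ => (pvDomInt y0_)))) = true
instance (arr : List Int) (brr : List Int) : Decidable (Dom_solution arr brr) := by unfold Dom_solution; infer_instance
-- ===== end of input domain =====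

-- B replaces A's mutating diff-list pass by a direct brute-force count of the proper prefixes
-- on which the two arrays have different sums (alternative decomposition; B is O(n^2), not faster).

-- ===== PORT A =====
-- A's loop body 'if diff[j]!=0: diff[j+1]=diff[j+1]+diff[j]; answer+=1' (state = (diff, answer));
-- indexing via PySem.pyGetD/pySetD: inside Pre_ every index is in range, so the defaults are never used.
def solStepA (p : List Int × Int) (j : Nat) : List Int × Int :=
  if PySem.List.pyGetD p.1 (j : Int) 0 ≠ 0 then
    (PySem.List.pySetD p.1 ((j : Int) + 1)
        (PySem.List.pyGetD p.1 ((j : Int) + 1) 0 + PySem.List.pyGetD p.1 (j : Int) 0),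
     p.2 + 1)
  else p

def solution (arr : List Int) (brr : List Int) : Int :=
  let diff : List Int :=
    (List.range arr.length).foldl
      (fun d i => d ++ [(PySem.List.pyGet? arr (Int.ofNat i)).getD 0 - (PySem.List.pyGet? brr (Int.ofNat i)).getD 0]) []
  ((List.range (diff.length - 1)).foldl solStepA (diff, 0)).2

-- ===== PORT B =====
-- 'for j in range(1, n): if sum(arr[:j]) != sum(brr[:j]): answer += 1'
def solution_alt (arr : List Int) (brr : List Int) : Int :=
  (List.range' 1 (arr.length - 1)).foldl
    (fun answer j =>
      if (PySem.List.slice arr none (some (Int.ofNat j))).sum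
           ≠ (PySem.List.slice brr none (some (Int.ofNat j))).sum
      then answer + 1 else answer) 0

-- ===== PRECONDITION & SPEC =====
-- Pre_ excludes arr longer than brr: there the Python A raises IndexError on brr[i].
def Pre_solution (arr : List Int) (brr : List Int) : Prop := arr.length ≤ brr.length
instance (arr : List Int) (brr : List Int) : Decidable (Pre_solution arr brr) := by unfold Pre_solution; infer_instance
def pvWitness_solution : List Int × List Int := ([1, 2, 3], [3, 2, 1])

def Spec_solution (arr : List Int) (brr : List Int) (out : Int) : Prop := out = solution_alt arr brr
instance (arr : List Int) (brr : List Int) (out : Int) : Decidable (Spec_solution arr brr out) := by unfold Spec_solution; infer_instance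

-- ===== CLAIM (what is proved, stated in full; the proofs are below) =====
def Claim_equal_solution : Prop := ∀ (arr : List Int) (brr : List Int), Dom_solution arr brr → Pre_solution arr brr → Spec_solution arr brr (solution arr brr)

-- ===== LEMMAS AND PROOFS =====

-- proof-side helper: A's conditional in-place add, seen as a running prefix-sum accumulator
def cntStep (p : Int × Int) (s : Int) : Int × Int :=
  let r := p.1 + s
  (r, if r ≠ 0 then p.2 + 1 else p.2)

lemma getD_append_cons (pre : List Int) (x : Int) (rest : List Int) :
    PySem.List.pyGetD (pre ++ x :: rest) ((pre.length : Nat) : Int) 0 = x := by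
  simp [PySem.List.pyGetD_natCast, List.getD_eq_getElem?_getD]

lemma getD_append_cons2 (pre : List Int) (x y : Int) (rest : List Int) :
    PySem.List.pyGetD (pre ++ x :: y :: rest) ((pre.length : Int) + 1) 0 = y := by
  have h : ((pre.length : Int) + 1) = (((pre.length + 1 : Nat)) : Int) := by push_cast; ring
  rw [h, PySem.List.pyGetD_natCast]
  induction pre with
  | nil => simp
  | cons p ps _ => simp

lemma setD_append_cons (pre : List Int) (x y v : Int) (rest : List Int) :
    PySem.List.pySetD (pre ++ x :: y :: rest) ((pre.length : Int) + 1) v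
      = pre ++ x :: v :: rest := by
  have h : ((pre.length : Int) + 1) = (((pre.length + 1 : Nat)) : Int) := by push_cast; ring
  rw [h, PySem.List.pySetD_natCast]
  induction pre with
  | nil => simp
  | cons p ps _ => simp

-- A's step j on a list whose entry at j is the prefix sum r+s equals the accumulator step consuming s.
lemma key (t : List Int) : ∀ (s : Int) (pre : List Int) (a r z : Int),
    ((List.range' pre.length (t.length + 1)).foldl solStepA
        (pre ++ (r + s) :: (t ++ [z]), a)).2
      = ((s :: t).foldl cntStep (r, a)).2 := by
  induction t with
  | nil =>
    intro s pre a r z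
    simp only [List.length_nil, List.range'_succ, List.range'_zero, List.foldl_cons, List.foldl_nil]
    by_cases h : r + s = 0 <;>
      simp [solStepA, cntStep, h]
  | cons s' t' ih =>
    intro s pre a r z
    simp only [List.length_cons]
    rw [List.range'_succ, List.foldl_cons]
    have hA : solStepA (pre ++ (r + s) :: (s' :: t' ++ [z]), a) pre.length
        = if r + s ≠ 0
          then ((pre ++ [r + s]) ++ ((r + s) + s') :: (t' ++ [z]), a + 1)
          else (pre ++ (r + s) :: (s' :: t' ++ [z]), a) := by
      by_cases h : r + s = 0
      · simp [solStepA, h]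
      · rw [if_pos (by simpa using h)]
        simp only [solStepA]
        rw [getD_append_cons]
        rw [show pre ++ (r + s) :: (s' :: t' ++ [z]) = pre ++ (r + s) :: s' :: (t' ++ [z]) from rfl]
        rw [getD_append_cons2, if_pos (by simpa using h), setD_append_cons]
        rw [add_comm s' (r + s)]
        simp
    by_cases h : r + s = 0
    · rw [hA, if_neg (by simpa using h)]
      have h2 := ih s' (pre ++ [r + s]) a (r + s) z
      rw [show (pre ++ [r + s]).length = pre.length + 1 from by simp] at h2
      rw [show (pre ++ [r + s]) ++ ((r + s) + s') :: (t' ++ [z])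
            = pre ++ (r + s) :: (s' :: t' ++ [z]) from by rw [h, zero_add]; simp] at h2
      rw [h2]
      simp [cntStep, h]
    · rw [hA, if_pos (by simpa using h)]
      have h2 := ih s' (pre ++ [r + s]) (a + 1) (r + s) z
      rw [show (pre ++ [r + s]).length = pre.length + 1 from by simp] at h2
      rw [h2]
      simp [cntStep, h]

-- A's fold over a list d equals the accumulator fold over d.dropLast
lemma A_fold_eq_cnt (d : List Int) :
    ((List.range (d.length - 1)).foldl solStepA (d, 0)).2
      = (d.dropLast.foldl cntStep (0, 0)).2 := by
  match d with
  | [] => rfl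
  | [x] => rfl
  | x :: y :: rest =>
    have hne : (y :: rest) ≠ [] := by simp
    obtain ⟨t, z, htz⟩ : ∃ t z, y :: rest = t ++ [z] :=
      ⟨(y :: rest).dropLast, (y :: rest).getLast hne, (List.dropLast_append_getLast hne).symm⟩
    rw [htz]
    have hlen : (x :: (t ++ [z])).length - 1 = t.length + 1 := by simp
    have hdl : (x :: (t ++ [z])).dropLast = x :: t := by
      rw [show x :: (t ++ [z]) = (x :: t) ++ [z] by simp, List.dropLast_concat]
    rw [hlen, hdl, List.range_eq_range']
    have := key t x [] 0 0 z
    simpa using this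

-- the accumulator fold counts the indices j with r + sum(t.take (j - m)) ≠ 0
lemma cnt_eq_count (t : List Int) : ∀ (m : Nat) (r a : Int),
    (t.foldl cntStep (r, a)).2
      = (List.range' (m + 1) t.length).foldl
          (fun b j => if r + (t.take (j - m)).sum ≠ 0 then b + 1 else b) a := by
  induction t with
  | nil => intro m r a; simp
  | cons s t' ih =>
    intro m r a
    simp only [List.foldl_cons, List.length_cons, List.range'_succ]
    have hstep : cntStep (r, a) s = (r + s, if r + s ≠ 0 then a + 1 else a) := rfl
    rw [hstep]
    have h1 : (s :: t').take (m + 1 - m) = [s] := by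
      rw [show m + 1 - m = 1 by omega]; rfl
    rw [h1]
    simp only [List.sum_cons, List.sum_nil, add_zero]
    rw [ih (m + 1) (r + s) (if r + s ≠ 0 then a + 1 else a)]
    apply PySem.List.foldl_congr_mem
    intro b j hj
    obtain ⟨i, hi, hji⟩ := List.mem_range'.mp hj
    have htake : (s :: t').take (j - m) = s :: t'.take (j - (m + 1)) := by
      rw [show j - m = (j - (m + 1)) + 1 by omega]
      rfl
    rw [htake]
    simp only [List.sum_cons, add_assoc]
    rfl

-- the elementwise difference both programs use
def dfn (arr brr : List Int) (i : Nat) : Int :=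
  (PySem.List.pyGet? arr (Int.ofNat i)).getD 0 - (PySem.List.pyGet? brr (Int.ofNat i)).getD 0

-- A materialises the diff values as a list
lemma diff_eq (arr brr : List Int) :
    (List.range arr.length).foldl
      (fun d i => d ++ [(PySem.List.pyGet? arr (Int.ofNat i)).getD 0 - (PySem.List.pyGet? brr (Int.ofNat i)).getD 0]) []
    = (List.range arr.length).map (dfn arr brr) := by
  simpa [dfn] using PySem.List.foldl_append_singleton_eq_map
    (l := List.range arr.length) (f := dfn arr brr) (acc := [])

-- peeling one element off a prefix sum (getD 0 also covers indices past the end)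
lemma take_succ_sum (l : List Int) (j : Nat) :
    (l.take (j + 1)).sum = (l.take j).sum + l.getD j 0 := by
  rw [List.take_add_one, List.sum_append]
  cases h : l[j]? <;> simp [List.getD_eq_getElem?_getD, h]

-- the sum of the first j diff values is the difference of the two prefix sums
lemma sum_diff (arr brr : List Int) (j : Nat) :
    ((List.range j).map (dfn arr brr)).sum = (arr.take j).sum - (brr.take j).sum := by
  induction j with
  | zero => simp
  | succ j ih =>
    rw [List.range_succ, List.map_append, List.sum_append, take_succ_sum, take_succ_sum, ih]
    simp [dfn, List.getD_eq_getElem?_getD]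
    ring

lemma main_eq (arr brr : List Int) : solution arr brr = solution_alt arr brr := by
  unfold solution solution_alt
  rw [diff_eq, A_fold_eq_cnt, cnt_eq_count _ 0]
  simp only [List.length_dropLast, List.length_map, List.length_range, Nat.zero_add]
  apply PySem.List.foldl_congr_mem
  intro b j hj
  obtain ⟨i, hi, hji⟩ := List.mem_range'.mp hj
  have htake : ((List.range arr.length).map (dfn arr brr)).dropLast.take (j - 0)
      = (List.range j).map (dfn arr brr) := by
    rw [Nat.sub_zero, List.dropLast_eq_take, List.take_take, List.length_map, List.length_range,
        min_eq_left (by omega : j ≤ arr.length - 1), ← List.map_take, List.take_range,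
        min_eq_left (by omega : j ≤ arr.length)]
  have hsa : PySem.List.slice arr none (some (Int.ofNat j)) = arr.take j :=
    PySem.List.slice_to_natCast arr j
  have hsb : PySem.List.slice brr none (some (Int.ofNat j)) = brr.take j :=
    PySem.List.slice_to_natCast brr j
  rw [htake, sum_diff, hsa, hsb]
  by_cases h : (arr.take j).sum = (brr.take j).sum <;> simp [h, sub_eq_zero]

-- ===== VERDICT (by name: the statement is the Claim_ definition above) =====
theorem solution_spec : Claim_equal_solution := by
  intro arr brr _ _
  unfold Spec_solution
  exact main_eq arr brr
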